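-- pv_equiv track=rewrite | github.com/SivachenkoEgor/GBPythonBasics | #1/Egor_Sivachenko_task_2.py | is_div_by_seven
-- ===== SOURCE A (Python) =====
-- def is_div_by_seven(number):
--     result = 0
--     temp = number
--     while temp > 0:
--         result += temp % 10
--         temp //= 10
--     if result % 7 == 0:
--         result = number
--     return result
-- ===== SOURCE B (Python) =====
-- def is_div_by_seven(number):
--     # digit sum via the decimal string instead of arithmetic extraction
--     result = sum(int(c) for c in str(number)) if number > 0 else 0
--     if result % 7 == 0:
--         result = number
--     return result
-- ===== Notes on version B (the rewrite author's own statement) =====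
-- stated objective: idiomatic
-- what changed: B computes the digit sum by summing the characters of str(number) instead of A's while loop extracting digits arithmetically with mod and floor division (guarded by 'if number > 0 else 0' so non-positive inputs keep A's behaviour of returning the number unchanged).
import Mathlib
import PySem

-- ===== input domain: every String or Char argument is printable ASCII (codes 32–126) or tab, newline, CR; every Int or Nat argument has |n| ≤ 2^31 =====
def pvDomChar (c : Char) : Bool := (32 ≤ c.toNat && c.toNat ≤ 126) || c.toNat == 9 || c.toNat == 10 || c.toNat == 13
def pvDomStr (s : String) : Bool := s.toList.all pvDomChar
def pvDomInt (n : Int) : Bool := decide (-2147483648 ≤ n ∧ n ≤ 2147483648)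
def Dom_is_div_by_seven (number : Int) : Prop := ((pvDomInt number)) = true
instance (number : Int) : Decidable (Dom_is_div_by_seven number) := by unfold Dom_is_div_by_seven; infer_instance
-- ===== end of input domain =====

-- B computes the digit sum from the decimal string of the number instead of A's %10 // 10 loop (idiomatic rewrite, same cost).
-- ===== PORT A =====
-- the 'while temp > 0' loop: state (temp, result)
def is_div_by_seven_loop (temp result : Int) : Int :=
  if _h : temp > 0 then
    is_div_by_seven_loop (PySem.Int.floordiv temp 10) (result + PySem.Int.mod temp 10)
  else result
termination_by temp.toNat
decreasing_by
  rw [PySem.Int.floordiv_eq_ediv_of_pos (by omega)]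
  omega

def is_div_by_seven (number : Int) : Int :=
  let result := is_div_by_seven_loop number 0
  if PySem.Int.mod result 7 = 0 then number else result

-- ===== PORT B =====
def is_div_by_seven_alt (number : Int) : Int :=
  let result :=
    if number > 0 then
      ((PySem.Int.toChars number).map (fun c => ((c.toNat : Int) - 48))).sum  -- int(c) for a digit character c
    else 0
  if PySem.Int.mod result 7 = 0 then number else result

-- ===== PRECONDITION & SPEC =====
def Spec_is_div_by_seven (number : Int) (out : Int) : Prop := out = is_div_by_seven_alt number
instance (number : Int) (out : Int) : Decidable (Spec_is_div_by_seven number out) := by unfold Spec_is_div_by_seven; infer_instance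

-- ===== CLAIM (what is proved, stated in full; the proofs are below) =====
def Claim_equal_is_div_by_seven : Prop := ∀ (number : Int), Dom_is_div_by_seven number → Spec_is_div_by_seven number (is_div_by_seven number)

-- ===== LEMMAS AND PROOFS =====

-- value of a digit character
lemma pv_digitChar_val (d : Nat) (h : d < 10) :
    ((Nat.digitChar d).toNat : Int) - 48 = (d : Int) := by
  interval_cases d <;> decide

-- character sum of toDigitsCore = digit sum (as Nat.digits) + character sum of the accumulator
lemma pv_core_sum (f : Nat) : ∀ (n : Nat) (acc : List Char), n < f →
    ((Nat.toDigitsCore 10 f n acc).map (fun c => ((c.toNat : Int) - 48))).sum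
      = (((Nat.digits 10 n).map (fun d => (d : Int))).sum
          + (acc.map (fun c => ((c.toNat : Int) - 48))).sum) := by
  induction f with
  | zero => intro n acc h; omega
  | succ f ih =>
    intro n acc h
    rw [Nat.toDigitsCore]
    by_cases h0 : n / 10 = 0
    · simp only [h0, if_true]
      by_cases hn : n = 0
      · subst hn; simp; decide
      · have hlt : n < 10 := by omega
        rw [Nat.digits_def' (by norm_num) (by omega)]
        have : n / 10 = 0 := h0
        simp [this, Nat.mod_eq_of_lt hlt, pv_digitChar_val n hlt]
    · simp only [h0, if_false]
      rw [Nat.digits_def' (b := 10) (by norm_num) (show 0 < n by omega)]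
      rw [ih (n / 10) _ (by omega)]
      simp [pv_digitChar_val (n % 10) (Nat.mod_lt _ (by norm_num))]
      ring

lemma pv_toChars_sum (n : Nat) :
    ((PySem.Int.toChars (n : Int)).map (fun c => ((c.toNat : Int) - 48))).sum
      = ((Nat.digits 10 n).map (fun d => (d : Int))).sum := by
  have : PySem.Int.toChars (n : Int) = Nat.toDigits 10 n := by
    simp [PySem.Int.toChars]
  rw [this, Nat.toDigits, pv_core_sum (n+1) n [] (by omega)]
  simp

-- A's loop computes the digit sum
lemma pv_loop_eq (n : Nat) : ∀ (r : Int),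
    is_div_by_seven_loop (n : Int) r = r + ((Nat.digits 10 n).map (fun d => (d : Int))).sum := by
  induction n using Nat.strong_induction_on with
  | _ n ih =>
    intro r
    rw [is_div_by_seven_loop]
    by_cases hn : (n : Int) > 0
    · have hn' : 0 < n := by exact_mod_cast hn
      simp only [hn, dif_pos]
      have hd : PySem.Int.floordiv (n : Int) 10 = ((n / 10 : Nat) : Int) :=
        PySem.Int.floordiv_natCast n 10
      have hm : PySem.Int.mod (n : Int) 10 = ((n % 10 : Nat) : Int) :=
        PySem.Int.mod_natCast n 10
      rw [hd, hm, ih (n / 10) (Nat.div_lt_self hn' (by norm_num))]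
      rw [Nat.digits_def' (b := 10) (by norm_num) hn']
      simp
      ring
    · have : n = 0 := by omega
      subst this
      simp

lemma pv_loop_neg (n : Int) (h : ¬ n > 0) : is_div_by_seven_loop n 0 = 0 := by
  rw [is_div_by_seven_loop]; simp [h]

-- ===== VERDICT (by name: the statement is the Claim_ definition above) =====
theorem is_div_by_seven_spec : Claim_equal_is_div_by_seven := by
  intro number _
  unfold Spec_is_div_by_seven is_div_by_seven is_div_by_seven_alt
  by_cases h : number > 0
  · have hcast : ((number.toNat : Nat) : Int) = number := Int.toNat_of_nonneg (by omega)
    have hA : is_div_by_seven_loop number 0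
        = ((Nat.digits 10 number.toNat).map (fun d => (d : Int))).sum := by
      have := pv_loop_eq number.toNat 0
      rw [hcast] at this; simpa using this
    have hB : ((PySem.Int.toChars number).map (fun c => ((c.toNat : Int) - 48))).sum
        = ((Nat.digits 10 number.toNat).map (fun d => (d : Int))).sum := by
      have := pv_toChars_sum number.toNat
      rw [hcast] at this; exact this
    simp only [h, if_true, hA, hB]
  · simp only [h, if_false, pv_loop_neg number h]
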